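-- pv_equiv track=rewrite | github.com/stickybath/gBot | gbot.py | getusr
-- ===== SOURCE A (Python) =====
-- def getusr(line):
--     sender = ""
--     for char in line:
--         if(char == "!"):
--             break
--         if(char != ":"):
--             sender += char
--     return (sender)
-- ===== SOURCE B (Python) =====
-- def getusr(line):
--     return line.partition("!")[0].replace(":", "")
-- ===== Notes on version B (the rewrite author's own statement) =====
-- stated objective: simpler
-- what changed: Replaces the interleaved per-character loop (break on '!', skip ':') with two sequential library passes: take the prefix before the first '!' via partition, then delete every ':' via replace; the C-level string methods avoid Python-level char-by-char concatenation.
import Mathlib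
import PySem

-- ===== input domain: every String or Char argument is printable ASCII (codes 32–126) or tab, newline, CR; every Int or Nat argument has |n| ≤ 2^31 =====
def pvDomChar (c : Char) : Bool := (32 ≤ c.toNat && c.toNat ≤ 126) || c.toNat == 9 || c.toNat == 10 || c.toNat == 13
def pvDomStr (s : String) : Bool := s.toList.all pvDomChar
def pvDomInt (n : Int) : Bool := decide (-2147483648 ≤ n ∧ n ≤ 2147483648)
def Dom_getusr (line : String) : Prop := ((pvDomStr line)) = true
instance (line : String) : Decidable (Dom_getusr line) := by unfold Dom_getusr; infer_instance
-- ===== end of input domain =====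

-- B replaces A's single interleaved character loop (break on '!', skip ':') by two
-- sequential library passes: take the prefix before the first '!', then delete every ':'.

-- ===== PORT A =====
-- the for-loop with break: structural recursion over the characters, same accumulator
def getusrGo : List Char → String → String
  | [], sender => sender
  | c :: rest, sender =>
    if c = '!' then sender
    else if c ≠ ':' then getusrGo rest (sender ++ c.toString)
    else getusrGo rest sender

def getusr (line : String) : String := getusrGo line.toList ""

-- ===== PORT B =====
def getusr_alt (line : String) : String :=
  -- line.partition("!")[0]: the prefix before the first '!' (exact for a one-char separator)
  let pre := line.toList.takeWhile (· ≠ '!')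
  -- .replace(":", "")
  String.ofList (PySem.Chars.replace pre [':'] [])

-- ===== PRECONDITION & SPEC =====
def Spec_getusr (line : String) (out : String) : Prop := out = getusr_alt line
instance (line : String) (out : String) : Decidable (Spec_getusr line out) := by unfold Spec_getusr; infer_instance

-- ===== CLAIM (what is proved, stated in full; the proofs are below) =====
def Claim_equal_getusr : Prop := ∀ (line : String), Dom_getusr line → Spec_getusr line (getusr line)

-- ===== LEMMAS AND PROOFS =====

theorem replace_go_colon (l acc : List Char) (fuel : Nat) (h : l.length ≤ fuel) :
    PySem.Chars.replace.go [':'] [] fuel l acc = acc.reverse ++ l.filter (· ≠ ':') := by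
  induction l generalizing acc fuel with
  | nil => cases fuel <;> simp [PySem.Chars.replace.go]
  | cons c t ih =>
    cases fuel with
    | zero => simp at h
    | succ n =>
      simp only [PySem.Chars.replace.go]
      by_cases hc : c = ':'
      · subst hc
        rw [if_pos (by simp [List.isPrefixOf])]
        simp only [List.length_cons, List.length_nil, List.drop_succ_cons, List.drop_zero, List.reverse_nil, List.nil_append]
        rw [ih acc n (by simpa using h)]
        simp
      · rw [if_neg (by simp [List.isPrefixOf]; intro h'; exact hc h'.symm)]
        rw [ih (c :: acc) n (by simpa using h)]
        simp [hc]

theorem replace_colon (l : List Char) :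
    PySem.Chars.replace l [':'] [] = l.filter (· ≠ ':') := by
  rw [PySem.Chars.replace]
  simp only [List.isEmpty_cons]
  exact replace_go_colon l [] l.length le_rfl

theorem getusrGo_eq (cs : List Char) (s : String) :
    getusrGo cs s = s ++ String.ofList ((cs.takeWhile (· ≠ '!')).filter (· ≠ ':')) := by
  induction cs generalizing s with
  | nil => simp [getusrGo]
  | cons c t ih =>
    simp only [getusrGo]
    by_cases hb : c = '!'
    · subst hb
      simp [List.takeWhile]
    · rw [if_neg hb]
      by_cases hc : c = ':'
      · subst hc
        rw [if_neg (by simp)]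
        rw [ih s]
        simp [hb]
      · rw [if_pos hc]
        rw [ih (s ++ c.toString)]
        have : s ++ c.toString ++ String.ofList ((t.takeWhile (· ≠ '!')).filter (· ≠ ':'))
            = s ++ String.ofList (c :: (t.takeWhile (· ≠ '!')).filter (· ≠ ':')) := by
          apply String.ext
          simp [Char.toString]
        rw [this]
        congr 1
        simp [hb, hc]

-- ===== VERDICT (by name: the statement is the Claim_ definition above) =====
theorem getusr_spec : Claim_equal_getusr := by
  intro line _
  unfold Spec_getusr getusr getusr_alt
  rw [getusrGo_eq]
  simp only []
  rw [replace_colon]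
  apply String.ext
  simp
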